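-- pv_equiv track=rewrite | github.com/Damnits/Projeto-Similaridade | Algoritmos.py | __LevenshteinAlgorit
-- ===== SOURCE A (Python) =====
-- def __LevenshteinAlgorit(caract1, caract2):
--     '''caract 1 é o caracter que voce vai pesquisar, o caracter 2 é o da base de dados '''
--     if caract1 == '':
--         return len(caract2)
--     elif caract2 == '':
--         return len(caract1)
--     else:
--         soma = 0 if caract1[0] == caract2[0] else 1
--         soma += __LevenshteinAlgorit(caract1[1:], caract2[1:])
--         return soma
-- ===== SOURCE B (Python) =====
-- def __LevenshteinAlgorit(caract1, caract2):
--     '''caract 1 é o caracter que voce vai pesquisar, o caracter 2 é o da base de dados '''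
--     return sum(a != b for a, b in zip(caract1, caract2)) + abs(len(caract1) - len(caract2))
-- ===== Notes on version B (the rewrite author's own statement) =====
-- stated objective: faster
-- what changed: Replaced the O(n^2) recursion with string slicing by a single linear zip pass counting mismatches plus abs(length difference), using the fact that A's recursion bottoms out returning the remaining suffix length.
import Mathlib
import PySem

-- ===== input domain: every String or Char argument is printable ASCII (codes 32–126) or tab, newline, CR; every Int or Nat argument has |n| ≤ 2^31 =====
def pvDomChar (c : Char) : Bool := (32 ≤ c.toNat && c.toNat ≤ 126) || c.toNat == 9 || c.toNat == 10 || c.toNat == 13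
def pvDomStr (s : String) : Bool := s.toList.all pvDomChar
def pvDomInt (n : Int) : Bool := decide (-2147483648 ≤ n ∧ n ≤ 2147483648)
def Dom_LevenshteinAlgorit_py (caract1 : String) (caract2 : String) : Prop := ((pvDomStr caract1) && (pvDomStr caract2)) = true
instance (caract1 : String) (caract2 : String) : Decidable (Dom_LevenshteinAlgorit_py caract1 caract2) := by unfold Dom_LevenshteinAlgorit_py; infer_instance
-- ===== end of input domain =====

-- B replaces A's O(n^2) slicing recursion by one linear zip pass counting mismatches plus abs(len difference); faster (asymptotic).

-- ===== PORT A =====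
-- A recurses on the strings; ported as structural recursion over the char lists
-- (caract1 == '' ↔ the char list is [], caract1[0]/caract1[1:] ↔ head/tail).
def pvA : List Char → List Char → Int
  | [], l2 => (l2.length : Int)
  | l1, [] => (l1.length : Int)
  | c1 :: t1, c2 :: t2 => (if c1 == c2 then (0 : Int) else 1) + pvA t1 t2

def LevenshteinAlgorit_py (caract1 : String) (caract2 : String) : Int :=
  pvA caract1.toList caract2.toList

-- ===== PORT B =====
-- sum(a != b for a, b in zip(...)) ported as countP over the zip; abs(len1 - len2) as |·| on Int.
def LevenshteinAlgorit_py_alt (caract1 : String) (caract2 : String) : Int :=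
  ((caract1.toList.zip caract2.toList).countP (fun p => p.1 != p.2) : Int)
    + |(caract1.toList.length : Int) - (caract2.toList.length : Int)|

-- ===== PRECONDITION & SPEC =====
def Spec_LevenshteinAlgorit_py (caract1 : String) (caract2 : String) (out : Int) : Prop := out = LevenshteinAlgorit_py_alt caract1 caract2
instance (caract1 : String) (caract2 : String) (out : Int) : Decidable (Spec_LevenshteinAlgorit_py caract1 caract2 out) := by unfold Spec_LevenshteinAlgorit_py; infer_instance

-- ===== CLAIM (what is proved, stated in full; the proofs are below) =====
def Claim_equal_LevenshteinAlgorit_py : Prop := ∀ (caract1 : String) (caract2 : String), Dom_LevenshteinAlgorit_py caract1 caract2 → Spec_LevenshteinAlgorit_py caract1 caract2 (LevenshteinAlgorit_py caract1 caract2)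

-- ===== LEMMAS AND PROOFS =====
theorem pvA_eq (l1 l2 : List Char) :
    pvA l1 l2 = ((l1.zip l2).countP (fun p => p.1 != p.2) : Int)
      + |(l1.length : Int) - (l2.length : Int)| := by
  induction l1 generalizing l2 with
  | nil =>
    cases l2 with
    | nil => simp [pvA]
    | cons c2 t2 =>
      simp only [pvA, List.zip_nil_left, List.countP_nil, List.length_nil, List.length_cons]
      push_cast
      rw [zero_sub, abs_neg, abs_of_nonneg (by positivity)]
      ring
  | cons c1 t1 ih =>
    cases l2 with
    | nil =>
      simp only [pvA, List.zip_nil_right, List.countP_nil, List.length_nil, List.length_cons]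
      push_cast
      rw [sub_zero, abs_of_nonneg (by positivity)]
      ring
    | cons c2 t2 =>
      simp [pvA, ih, List.zip_cons_cons, List.countP_cons,
        show ∀ x y : Int, (x + 1) - (y + 1) = x - y from fun x y => by ring]
      by_cases hc : c1 = c2 <;> simp [hc] <;> ring

-- ===== VERDICT (by name: the statement is the Claim_ definition above) =====
theorem LevenshteinAlgorit_py_spec : Claim_equal_LevenshteinAlgorit_py := by
  intro c1 c2 _
  unfold Spec_LevenshteinAlgorit_py LevenshteinAlgorit_py LevenshteinAlgorit_py_alt
  exact pvA_eq _ _
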